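-- pv_equiv track=rewrite | github.com/aeehassan/Lexical-Error-Handler | base.py | __is_num_ill_formed
-- ===== SOURCE A (Python) =====
-- import string
--
-- def __is_num_ill_formed(error):
--     # Pre-check: if there's no digit at all, it can't be close to a number
--     if not any(char.isdigit() for char in error):
--         return False
--
--     # To check if special characters are in the number
--     invalid_chars = string.ascii_letters + string.punctuation.replace('.', '') + string.whitespace
--     # To check if there are two dps in the number
--     count_of_dps = 0
--
--     for char in error:
--         if char == '.':
--             count_of_dps += 1
--         if char in invalid_chars or count_of_dps == 2:
--             return True
--     return False
-- ===== SOURCE B (Python) =====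
-- def __is_num_ill_formed(error):
--     # One pass, three-way classification by complement: on the printable-ASCII
--     # domain, a character that is neither a digit nor '.' is exactly one of
--     # A's invalid characters (letter, non-dot punctuation or whitespace).
--     digits = dots = others = 0
--     for char in error:
--         if char.isdigit():
--             digits += 1
--         elif char == '.':
--             dots += 1
--         else:
--             others += 1
--     return digits > 0 and (others > 0 or dots >= 2)
-- ===== Notes on version B (the rewrite author's own statement) =====
-- stated objective: alternative
-- what changed: Drops A's invalid_chars table and its stateful short-circuiting membership scan entirely: B makes one pass classifying each character by complement into three counters (digit, dot, neither) and decides from the final counts, trading the early exit for a table-free classification; correct because on the printable-ASCII domain a character that is neither a digit nor a dot is exactly one of A's invalid characters.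
import Mathlib
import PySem

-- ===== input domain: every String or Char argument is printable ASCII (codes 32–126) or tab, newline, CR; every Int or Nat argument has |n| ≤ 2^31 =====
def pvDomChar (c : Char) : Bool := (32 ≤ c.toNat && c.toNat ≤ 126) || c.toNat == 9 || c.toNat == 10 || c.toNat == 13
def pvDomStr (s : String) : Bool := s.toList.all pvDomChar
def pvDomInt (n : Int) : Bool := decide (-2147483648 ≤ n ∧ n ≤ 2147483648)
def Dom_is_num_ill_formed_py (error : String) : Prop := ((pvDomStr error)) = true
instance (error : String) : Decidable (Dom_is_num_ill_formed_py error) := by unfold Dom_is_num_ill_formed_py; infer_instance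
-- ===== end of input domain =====

-- B drops A's invalid_chars table and short-circuit scan: one pass classifying each char by
-- complement (digit / dot / neither) into three counters, then a decision from the final counts.

-- ===== PORT A =====
-- string.ascii_letters + string.punctuation.replace('.', '') + string.whitespace
def pvInvalidChars : List Char :=
  ("abcdefghijklmnopqrstuvwxyzABCDEFGHIJKLMNOPQRSTUVWXYZ!\"#$%&'()*+,-/:;<=>?@[\\]^_`{|}~ \t\n\r\x0B\x0C").toList

-- the for-loop of A: state = count_of_dps; bump on '.', early-return on invalid char or counter == 2
def pvLoopA : List Char → Nat → Bool
  | [], _ => false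
  | c :: rest, k =>
    let k' := if c == '.' then k + 1 else k
    if pvInvalidChars.contains c || k' == 2 then true else pvLoopA rest k'

def is_num_ill_formed_py (error : String) : Bool :=
  if !(error.toList.any PySem.Chars.isdigit) then false
  else pvLoopA error.toList 0

-- ===== PORT B =====
-- B's loop: three counters (digits, dots, neither), each char classified by complement
def pvClassify : List Char → Nat → Nat → Nat → Nat × Nat × Nat
  | [], d, p, o => (d, p, o)
  | c :: rest, d, p, o =>
    if PySem.Chars.isdigit c then pvClassify rest (d + 1) p o
    else if c == '.' then pvClassify rest d (p + 1) o
    else pvClassify rest d p (o + 1)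

def is_num_ill_formed_py_alt (error : String) : Bool :=
  let t := pvClassify error.toList 0 0 0
  decide (0 < t.1) && (decide (0 < t.2.2) || decide (2 ≤ t.2.1))

-- ===== PRECONDITION & SPEC =====
def Spec_is_num_ill_formed_py (error : String) (out : Bool) : Prop := out = is_num_ill_formed_py_alt error
instance (error : String) (out : Bool) : Decidable (Spec_is_num_ill_formed_py error out) := by unfold Spec_is_num_ill_formed_py; infer_instance

-- ===== CLAIM (what is proved, stated in full; the proofs are below) =====
def Claim_equal_is_num_ill_formed_py : Prop := ∀ (error : String), Dom_is_num_ill_formed_py error → Spec_is_num_ill_formed_py error (is_num_ill_formed_py error)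

-- ===== LEMMAS AND PROOFS =====

-- loop invariant for A: with counter k ≤ 1, the loop returns true iff some char is invalid or k + dots reaches 2
theorem pvLoopA_eq (cs : List Char) : ∀ (k : Nat), k ≤ 1 →
    pvLoopA cs k = (cs.any (fun c => pvInvalidChars.contains c) || decide (k + cs.count '.' ≥ 2)) := by
  induction cs with
  | nil => intro k hk; simp [pvLoopA]; omega
  | cons c rest ih =>
    intro k hk
    by_cases hdot : c = '.'
    · subst hdot
      have hdotinv : pvInvalidChars.contains '.' = false := by decide
      interval_cases k
      · rw [pvLoopA]
        simp only [beq_self_eq_true, if_pos, hdotinv, Bool.false_or]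
        have h12 : ((0 + 1 : Nat) == 2) = false := by decide
        rw [h12, if_neg Bool.false_ne_true, ih 1 (by omega)]
        simp only [List.any_cons, List.count_cons, hdotinv, Bool.false_or]
        congr 1
        simp only [beq_self_eq_true, decide_eq_decide, if_true]
        omega
      · rw [pvLoopA]
        simp only [beq_self_eq_true, if_pos]
        simp only [Bool.or_true, List.count_cons]
        have : (1 + (rest.count '.' + 1) ≥ 2) := by omega
        simp [this]
    · have hbne : (c == '.') = false := by simpa using hdot
      have hk2 : ((k : Nat) == 2) = false := by
        have : k ≠ 2 := by omega
        simpa using this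
      rw [pvLoopA]
      simp only [hbne, if_neg Bool.false_ne_true, hk2, Bool.or_false]
      by_cases hinv : c ∈ pvInvalidChars
      · simp [hinv]
      · have hinv' : pvInvalidChars.contains c = false := by simpa [List.contains_iff_mem] using hinv
        rw [hinv', if_neg Bool.false_ne_true, ih k hk]
        simp [hdot, hinv]

-- on the ASCII domain, a char that is neither a digit nor '.' lies in A's invalid set (checked over codes 0–127)
set_option maxRecDepth 100000 in
theorem dom_other_invalid (c : Char) (hdom : pvDomChar c = true)
    (hdig : PySem.Chars.isdigit c = false) (hdot : (c == '.') = false) :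
    pvInvalidChars.contains c = true := by
  have hall : (List.range 128).all
      (fun n => !pvDomChar (Char.ofNat n) || PySem.Chars.isdigit (Char.ofNat n)
        || (Char.ofNat n == '.') || pvInvalidChars.contains (Char.ofNat n)) = true := by decide
  have hlt : c.toNat < 128 := by
    simp only [pvDomChar, Bool.or_eq_true, Bool.and_eq_true, decide_eq_true_eq, beq_iff_eq] at hdom
    omega
  have := List.all_eq_true.mp hall c.toNat (List.mem_range.mpr hlt)
  rw [Char.ofNat_toNat] at this
  simp only [hdom, hdig, hdot, Bool.not_true, Bool.false_or] at this
  exact this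

-- a digit is never in A's invalid set
set_option maxRecDepth 100000 in
theorem digit_not_invalid (c : Char) (hdig : PySem.Chars.isdigit c = true) :
    pvInvalidChars.contains c = false := by
  have hall : (List.range 128).all
      (fun n => !PySem.Chars.isdigit (Char.ofNat n) || !pvInvalidChars.contains (Char.ofNat n)) = true := by decide
  have hlt : c.toNat < 128 := by
    simp only [PySem.Chars.isdigit, Bool.and_eq_true, decide_eq_true_eq] at hdig
    have : c ≤ '9' := hdig.2
    have h9 : c.toNat ≤ 57 := this
    omega
  have := List.all_eq_true.mp hall c.toNat (List.mem_range.mpr hlt)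
  rw [Char.ofNat_toNat] at this
  simp only [hdig, Bool.not_true, Bool.false_or, Bool.not_eq_true'] at this
  exact this

-- B's loop computes the three counts
theorem pvClassify_eq (cs : List Char) : ∀ (d p o : Nat),
    pvClassify cs d p o =
      (d + cs.countP PySem.Chars.isdigit,
       p + cs.countP (fun c => !PySem.Chars.isdigit c && (c == '.')),
       o + cs.countP (fun c => !PySem.Chars.isdigit c && !(c == '.'))) := by
  induction cs with
  | nil => intro d p o; simp [pvClassify]
  | cons c rest ih =>
    intro d p o
    rw [pvClassify]
    by_cases hdig : PySem.Chars.isdigit c = true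
    · rw [if_pos hdig, ih]
      simp [hdig, Nat.add_comm, Nat.add_left_comm]
    · have hdig' : PySem.Chars.isdigit c = false := by simpa using hdig
      rw [if_neg (by simp [hdig'])]
      by_cases hdot : (c == '.') = true
      · rw [if_pos hdot, ih]
        simp [hdig', hdot, Nat.add_comm, Nat.add_assoc]
      · have hdot' : (c == '.') = false := by simpa using hdot
        rw [if_neg (by simp [hdot']), ih]
        simp [hdig', hdot', Nat.add_comm, Nat.add_assoc]

-- ===== VERDICT (by name: the statement is the Claim_ definition above) =====
theorem is_num_ill_formed_py_spec : Claim_equal_is_num_ill_formed_py := by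
  intro error hdom
  unfold Dom_is_num_ill_formed_py pvDomStr at hdom
  unfold Spec_is_num_ill_formed_py is_num_ill_formed_py is_num_ill_formed_py_alt
  rw [pvClassify_eq]
  simp only [Nat.zero_add]
  set cs := error.toList with hcs
  -- digits-count positivity ↔ the any-digit pre-check
  have hdcount : decide (0 < cs.countP PySem.Chars.isdigit) = cs.any PySem.Chars.isdigit := by
    rw [Bool.eq_iff_iff]
    simp [List.countP_pos_iff, List.any_eq_true]
  -- dot count: on any input, the classified dot count equals count '.' ('.'' is not a digit)
  have hdots : cs.countP (fun c => !PySem.Chars.isdigit c && (c == '.')) = cs.count '.' := by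
    unfold List.count
    apply List.countP_congr
    intro c _
    by_cases h : c = '.'
    · subst h; decide
    · simp [h]
  -- others-count positivity ↔ the any-invalid test, using the domain
  have hoth : decide (0 < cs.countP (fun c => !PySem.Chars.isdigit c && !(c == '.'))) =
      cs.any (fun c => pvInvalidChars.contains c) := by
    rw [Bool.eq_iff_iff]
    simp only [decide_eq_true_eq, List.countP_pos_iff, List.any_eq_true]
    constructor
    · rintro ⟨c, hc, hp⟩
      refine ⟨c, hc, ?_⟩
      simp only [Bool.and_eq_true, Bool.not_eq_true'] at hp
      exact dom_other_invalid c (List.all_eq_true.mp hdom c hc) hp.1 hp.2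
    · rintro ⟨c, hc, hinv⟩
      refine ⟨c, hc, ?_⟩
      have hdig : PySem.Chars.isdigit c = false := by
        by_contra hd
        have := digit_not_invalid c (by simpa using hd)
        rw [this] at hinv; exact absurd hinv (by simp)
      have hdot : (c == '.') = false := by
        by_contra hd
        have hce : c = '.' := by simpa using hd
        subst hce
        exact absurd hinv (by decide)
      simp [hdig, hdot]
  by_cases hany : cs.any PySem.Chars.isdigit = true
  · rw [hany] at hdcount ⊢
    simp only [Bool.not_true, if_neg Bool.false_ne_true, hdcount, Bool.true_and]
    rw [pvLoopA_eq cs 0 (by omega), hoth, hdots]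
    simp
  · have hany' : cs.any PySem.Chars.isdigit = false := by simpa using hany
    rw [hany'] at hdcount
    rw [hany', hdcount]
    simp
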